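-- pv_equiv track=rewrite | github.com/ui2030/capstone_translate | 진짜마지막임임.py | create_line_entry
-- ===== SOURCE A (Python) =====
-- def create_line_entry(line_words):
--     full_text = " ".join([word[0] for word in line_words])
--     left = min(word[1] for word in line_words)
--     top = min(word[2] for word in line_words)
--     right = max(word[1] + word[3] for word in line_words)
--     bottom = max(word[2] + word[4] for word in line_words)
--     font_size = max(word[4] for word in line_words)
--     bbox = (left, top, right, bottom)
--
--     return (full_text, bbox, font_size)
-- ===== SOURCE B (Python) =====
-- def create_line_entry(line_words):
--     # single pass: take first word as seed, update running extremes over the rest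
--     first = line_words[0]
--     texts = [first[0]]
--     left, top = first[1], first[2]
--     right, bottom = first[1] + first[3], first[2] + first[4]
--     font_size = first[4]
--     for word in line_words[1:]:
--         texts.append(word[0])
--         if word[1] < left:
--             left = word[1]
--         if word[2] < top:
--             top = word[2]
--         if word[1] + word[3] > right:
--             right = word[1] + word[3]
--         if word[2] + word[4] > bottom:
--             bottom = word[2] + word[4]
--         if word[4] > font_size:
--             font_size = word[4]
--     return (" ".join(texts), (left, top, right, bottom), font_size)
-- ===== Notes on version B (the rewrite author's own statement) =====
-- stated objective: alternative
-- what changed: Replaces six separate full-list comprehensions/reductions (join, two mins, three maxes) with one loop seeded from the first word that maintains all running extremes and the text list in a single pass.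
import Mathlib
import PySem

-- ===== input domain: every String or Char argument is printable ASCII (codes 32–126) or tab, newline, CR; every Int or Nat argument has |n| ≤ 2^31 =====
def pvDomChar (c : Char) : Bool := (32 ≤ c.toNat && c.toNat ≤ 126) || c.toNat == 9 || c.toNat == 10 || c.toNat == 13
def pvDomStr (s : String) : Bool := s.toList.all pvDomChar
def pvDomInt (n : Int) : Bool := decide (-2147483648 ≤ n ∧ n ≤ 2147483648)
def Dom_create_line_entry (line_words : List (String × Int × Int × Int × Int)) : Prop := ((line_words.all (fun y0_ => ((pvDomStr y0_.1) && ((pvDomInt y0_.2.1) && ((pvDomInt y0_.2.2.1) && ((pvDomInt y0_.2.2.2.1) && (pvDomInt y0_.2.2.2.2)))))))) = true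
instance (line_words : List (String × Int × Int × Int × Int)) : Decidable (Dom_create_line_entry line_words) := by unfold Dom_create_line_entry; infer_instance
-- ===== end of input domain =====

-- B fuses A's six separate reductions into one pass seeded from the first word (alternative decomposition, same cost).

-- ===== PORT A =====
-- A: join of a comprehension, then five separate min/max reductions over the whole list.
def create_line_entry (line_words : List (String × Int × Int × Int × Int)) : String × (Int × Int × Int × Int) × Int :=
  let full_text := PySem.Str.join " " (line_words.map (fun w => w.1))
  let left := (PySem.List.min? (line_words.map (fun w => w.2.1)) (fun x => x)).getD 0
  let top := (PySem.List.min? (line_words.map (fun w => w.2.2.1)) (fun x => x)).getD 0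
  let right := (PySem.List.max? (line_words.map (fun w => w.2.1 + w.2.2.2.1)) (fun x => x)).getD 0
  let bottom := (PySem.List.max? (line_words.map (fun w => w.2.2.1 + w.2.2.2.2)) (fun x => x)).getD 0
  let font_size := (PySem.List.max? (line_words.map (fun w => w.2.2.2.2)) (fun x => x)).getD 0
  (full_text, (left, top, right, bottom), font_size)

-- ===== PORT B =====
-- B's loop body: update the six accumulators from one word.
def clbStep (st : List String × Int × Int × Int × Int × Int)
    (w : String × Int × Int × Int × Int) : List String × Int × Int × Int × Int × Int :=
  let (ts, l, t, r, b, f) := st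
  (ts ++ [w.1],
   if w.2.1 < l then w.2.1 else l,
   if w.2.2.1 < t then w.2.2.1 else t,
   if w.2.1 + w.2.2.2.1 > r then w.2.1 + w.2.2.2.1 else r,
   if w.2.2.1 + w.2.2.2.2 > b then w.2.2.1 + w.2.2.2.2 else b,
   if w.2.2.2.2 > f then w.2.2.2.2 else f)

def create_line_entry_alt (line_words : List (String × Int × Int × Int × Int)) : String × (Int × Int × Int × Int) × Int :=
  match line_words with
  | [] => ("", (0, 0, 0, 0), 0)   -- unreachable under Pre_ (Python B raises IndexError on [])
  | w0 :: rest =>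
    let st := rest.foldl clbStep
      ([w0.1], w0.2.1, w0.2.2.1, w0.2.1 + w0.2.2.2.1, w0.2.2.1 + w0.2.2.2.2, w0.2.2.2.2)
    let (ts, l, t, r, b, f) := st
    (PySem.Str.join " " ts, (l, t, r, b), f)

-- ===== PRECONDITION & SPEC =====
-- Pre_ excludes the empty list, on which A raises ValueError (min of empty sequence); B raises IndexError there.
def Pre_create_line_entry (line_words : List (String × Int × Int × Int × Int)) : Prop := line_words ≠ []
instance (line_words : List (String × Int × Int × Int × Int)) : Decidable (Pre_create_line_entry line_words) := by unfold Pre_create_line_entry; infer_instance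
def pvWitness_create_line_entry : (List (String × Int × Int × Int × Int)) := [("hi", 1, 2, 3, 4)]

def Spec_create_line_entry (line_words : List (String × Int × Int × Int × Int)) (out : String × (Int × Int × Int × Int) × Int) : Prop := out = create_line_entry_alt line_words
instance (line_words : List (String × Int × Int × Int × Int)) (out : String × (Int × Int × Int × Int) × Int) : Decidable (Spec_create_line_entry line_words out) := by unfold Spec_create_line_entry; infer_instance

-- ===== CLAIM (what is proved, stated in full; the proofs are below) =====
def Claim_equal_create_line_entry : Prop := ∀ (line_words : List (String × Int × Int × Int × Int)), Dom_create_line_entry line_words → Pre_create_line_entry line_words → Spec_create_line_entry line_words (create_line_entry line_words)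

-- ===== LEMMAS AND PROOFS =====

-- B's fused loop computes exactly the six independent folds.
theorem clbStep_foldl (rest : List (String × Int × Int × Int × Int))
    (ts : List String) (l t r b f : Int) :
    rest.foldl clbStep (ts, l, t, r, b, f) =
      (ts ++ rest.map (fun w => w.1),
       rest.foldl (fun a w => min a w.2.1) l,
       rest.foldl (fun a w => min a w.2.2.1) t,
       rest.foldl (fun a w => max a (w.2.1 + w.2.2.2.1)) r,
       rest.foldl (fun a w => max a (w.2.2.1 + w.2.2.2.2)) b,
       rest.foldl (fun a w => max a w.2.2.2.2) f) := by
  induction rest generalizing ts l t r b f with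
  | nil => simp
  | cons w tl ih =>
    simp only [List.foldl_cons, clbStep, ih, List.map_cons]
    have e1 : (if w.2.1 < l then w.2.1 else l) = min l w.2.1 := by
      simp only [min_def]; split_ifs <;> omega
    have e2 : (if w.2.2.1 < t then w.2.2.1 else t) = min t w.2.2.1 := by
      simp only [min_def]; split_ifs <;> omega
    have e3 : (if w.2.1 + w.2.2.2.1 > r then w.2.1 + w.2.2.2.1 else r) = max r (w.2.1 + w.2.2.2.1) := by
      simp only [max_def]; split_ifs <;> omega
    have e4 : (if w.2.2.1 + w.2.2.2.2 > b then w.2.2.1 + w.2.2.2.2 else b) = max b (w.2.2.1 + w.2.2.2.2) := by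
      simp only [max_def]; split_ifs <;> omega
    have e5 : (if w.2.2.2.2 > f then w.2.2.2.2 else f) = max f w.2.2.2.2 := by
      simp only [max_def]; split_ifs <;> omega
    rw [e1, e2, e3, e4, e5]
    simp

-- ===== VERDICT (by name: the statement is the Claim_ definition above) =====
theorem create_line_entry_spec : Claim_equal_create_line_entry := by
  intro lw _ hpre
  unfold Spec_create_line_entry create_line_entry create_line_entry_alt
  match lw, hpre with
  | w0 :: rest, _ =>
    simp only [clbStep_foldl, List.map_cons,
      PySem.List.min?_id_cons, PySem.List.max?_id_cons, Option.getD_some, List.foldl_map]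
    simp
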